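-- pv_equiv track=rewrite | github.com/jmglod/ASD | Lab13 dynamic programming/main.py | string_compare_pd_dop_podc
-- ===== SOURCE A (Python) =====
-- def string_compare_pd_dop_podc(P, T):
--     len_P = len(P)
--     len_T = len(T)
--
--     D = [[0 for _ in range(len_T)] for _ in range(len_P)]
--     for i in range(len(D)):
--         D[i][0] = i
--
--     parents = [['X' for _ in range(len_T)] for _ in range(len_P)]
--     for i in range(1, len(parents)):
--         parents[i][0] = 'D'
--
--     for i in range(1, len_P):
--         for j in range(1, len_T):
--
--             zamian = D[i - 1][j - 1] + (P[i] != T[j])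
--             wstawien = D[i][j - 1] + 1
--             usuniec = D[i - 1][j] + 1
--
--             possibilities = [zamian, wstawien, usuniec]
--             min_dst = min(possibilities)
--             idx = possibilities.index(min_dst)
--             D[i][j] = min_dst
--             if idx == 0:
--                 # dodatkowe, może niezbyt efektywne sprawdzanie rodzaju M/S
--                 if zamian == D[i - 1][j - 1]:
--                     parents[i][j] = 'M'
--                 else:
--                     parents[i][j] = 'S'
--             elif idx == 1:
--                 parents[i][j] = 'I'
--             else:
--                 parents[i][j] = 'D'
--     minimum = float('inf')
--     min_idx = None
--     for i in range(len(D[0])):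
--         if D[-1][i] < minimum:
--             minimum = D[-1][i]
--             min_idx = i
--
--     return min_idx
-- ===== SOURCE B (Python) =====
-- def string_compare_pd_dop_podc(P, T):
--     n = len(P)
--     m = len(T)
--     memo = {}
--
--     def d(i, j):
--         # demand-driven evaluation of the recurrence with an explicit work stack
--         # (no recursion, no table): frames are (row, col, ready)
--         stack = [(i, j, False)]
--         while stack:
--             a, b, ready = stack.pop()
--             if b == 0:
--                 memo[(a, b)] = a
--             elif a == 0:
--                 memo[(a, b)] = 0
--             elif (a, b) in memo:
--                 pass
--             elif ready:
--                 memo[(a, b)] = min(memo[(a - 1, b - 1)] + (P[a] != T[b]),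
--                                    memo[(a, b - 1)] + 1,
--                                    memo[(a - 1, b)] + 1)
--             else:
--                 stack.append((a, b, True))
--                 stack.append((a - 1, b - 1, False))
--                 stack.append((a, b - 1, False))
--                 stack.append((a - 1, b, False))
--         return memo[(i, j)]
--
--     last = [d(n - 1, j) for j in range(m)]
--     best = min(last)
--     return last.index(best)
-- ===== Notes on version B (the rewrite author's own statement) =====
-- stated objective: alternative
-- what changed: Replaces the iterative row-by-row fill of the full D table (and drops the unused parents table) by demand-driven top-down evaluation of the same recurrence: a memo dict plus an explicit two-phase work stack compute each last-row cell on demand, then min()+index() give the first argmin.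
import Mathlib
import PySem

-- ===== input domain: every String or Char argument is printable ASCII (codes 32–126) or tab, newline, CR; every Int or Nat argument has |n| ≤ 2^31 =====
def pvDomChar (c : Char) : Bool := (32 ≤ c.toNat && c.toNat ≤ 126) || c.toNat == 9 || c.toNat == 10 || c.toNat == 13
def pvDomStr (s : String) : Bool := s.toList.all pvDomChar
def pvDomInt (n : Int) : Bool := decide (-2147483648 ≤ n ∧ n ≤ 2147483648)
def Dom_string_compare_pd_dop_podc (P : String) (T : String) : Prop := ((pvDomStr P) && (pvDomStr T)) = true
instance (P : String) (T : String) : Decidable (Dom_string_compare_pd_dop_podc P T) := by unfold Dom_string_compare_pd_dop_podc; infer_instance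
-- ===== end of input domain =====

-- B drops the unused parents table and replaces A's row-by-row iterative table fill by demand-driven
-- top-down evaluation of the recurrence (memo dict + explicit two-phase work stack), then min+index
-- give the first argmin of the last row (objective: alternative; not faster).

-- ===== PORT A =====
-- A-side helpers: one cell of the double loop (state = (D, parents)), then one row.
def pvA_cell (p t : List Char) (i : Int)
    (st : List (List Int) × List (List Char)) (j : Int) :
    List (List Int) × List (List Char) :=
  let D := st.1
  let parents := st.2
  let zamian := PySem.List.pyGetD (PySem.List.pyGetD D (i-1) []) (j-1) 0 +
      (if PySem.List.pyGetD p i ' ' ≠ PySem.List.pyGetD t j ' ' then (1:Int) else 0)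
  let wstawien := PySem.List.pyGetD (PySem.List.pyGetD D i []) (j-1) 0 + 1
  let usuniec := PySem.List.pyGetD (PySem.List.pyGetD D (i-1) []) j 0 + 1
  let possibilities := [zamian, wstawien, usuniec]
  let min_dst := (PySem.List.min? possibilities (fun x => x)).getD 0
  let idx := (PySem.List.index? possibilities min_dst).getD 0
  let D' := PySem.List.pySetD D i (PySem.List.pySetD (PySem.List.pyGetD D i []) j min_dst)
  let parents' :=
    if idx = 0 then
      (if zamian = PySem.List.pyGetD (PySem.List.pyGetD D' (i-1) []) (j-1) 0 then
        PySem.List.pySetD parents i (PySem.List.pySetD (PySem.List.pyGetD parents i []) j 'M')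
      else
        PySem.List.pySetD parents i (PySem.List.pySetD (PySem.List.pyGetD parents i []) j 'S'))
    else if idx = 1 then
      PySem.List.pySetD parents i (PySem.List.pySetD (PySem.List.pyGetD parents i []) j 'I')
    else
      PySem.List.pySetD parents i (PySem.List.pySetD (PySem.List.pyGetD parents i []) j 'D')
  (D', parents')

def pvA_row (p t : List Char)
    (st : List (List Int) × List (List Char)) (i : Int) :
    List (List Int) × List (List Char) :=
  (PySem.List.pyRange 1 (t.length : Int) 1).foldl (pvA_cell p t i) st

-- the float('inf') sentinel of the final scan is ported as `none` in an Option Int accumulator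
def string_compare_pd_dop_podc (P : String) (T : String) : Option Int :=
  let p := P.toList
  let t := T.toList
  let len_P := p.length
  let len_T := t.length
  let D : List (List Int) := List.replicate len_P (List.replicate len_T (0:Int))
  let D := (List.range D.length).foldl
      (fun D (i : Nat) => PySem.List.pySetD D (i : Int)
        (PySem.List.pySetD (PySem.List.pyGetD D (i : Int) []) 0 (i : Int))) D
  let parents : List (List Char) := List.replicate len_P (List.replicate len_T 'X')
  let parents := (PySem.List.pyRange 1 (parents.length : Int) 1).foldl
      (fun par i => PySem.List.pySetD par i
        (PySem.List.pySetD (PySem.List.pyGetD par i []) 0 'D')) parents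
  let st := (PySem.List.pyRange 1 (len_P : Int) 1).foldl (pvA_row p t) (D, parents)
  let Df := st.1
  let fin := (List.range (PySem.List.pyGetD Df 0 []).length).foldl
      (fun (acc : Option Int × Option Int) (i : Nat) =>
        match acc.1 with
        | none => (some (PySem.List.pyGetD (PySem.List.pyGetD Df (-1) []) (i : Int) 0), some (i : Int))
        | some mm =>
          if PySem.List.pyGetD (PySem.List.pyGetD Df (-1) []) (i : Int) 0 < mm then
            (some (PySem.List.pyGetD (PySem.List.pyGetD Df (-1) []) (i : Int) 0), some (i : Int))
          else acc)
      ((none, none) : Option Int × Option Int)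
  fin.2

-- ===== PORT B =====
-- B-side helpers: the explicit work-stack loop of Source B's inner function d.
-- Frames are (row, col, ready); indices are Nat (inside Pre_ every Python index is nonnegative,
-- so the Nat transcription is exact there).
def pvB_weight : Nat × Nat × Bool → Nat
  | (a, b, false) => 4 ^ (a + b + 1)
  | (_, _, true) => 1

-- cited by pvB_loop's decreasing_by
lemma pvB_weight_pos (f : Nat × Nat × Bool) : 0 < pvB_weight f := by
  rcases f with ⟨a, b, _ | _⟩
  · exact Nat.pow_pos (by omega)
  · exact Nat.one_pos

def pvB_loop (p t : List Char) :
    List (Nat × Nat × Bool) → PySem.Dict (Nat × Nat) Int → PySem.Dict (Nat × Nat) Int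
  | [], memo => memo
  | (a, 0, _) :: st, memo => pvB_loop p t st (memo.insert (a, 0) (a : Int))
  | (0, b+1, _) :: st, memo => pvB_loop p t st (memo.insert (0, b+1) 0)
  | (a+1, b+1, ready) :: st, memo =>
      if memo.contains (a+1, b+1) then
        pvB_loop p t st memo
      else if ready then
        pvB_loop p t st (memo.insert (a+1, b+1)
          (min (memo.getD (a, b) 0 +
              (if PySem.List.pyGetD p ((a:Int)+1) ' ' ≠ PySem.List.pyGetD t ((b:Int)+1) ' '
               then (1:Int) else 0))
            (min (memo.getD (a+1, b) 0 + 1) (memo.getD (a, b+1) 0 + 1))))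
      else
        pvB_loop p t
          ((a, b+1, false) :: (a+1, b, false) :: (a, b, false) :: (a+1, b+1, true) :: st) memo
termination_by st _ => (st.map pvB_weight).sum
decreasing_by
  · rename_i x
    simp only [List.map_cons, List.sum_cons]
    have hw := pvB_weight_pos (a, 0, x)
    omega
  · rename_i x
    simp only [Nat.succ_eq_add_one, List.map_cons, List.sum_cons]
    have hw := pvB_weight_pos (0, b+1, x)
    omega
  · simp only [Nat.succ_eq_add_one, List.map_cons, List.sum_cons]
    have hw := pvB_weight_pos (a+1, b+1, ready)
    omega
  · simp only [Nat.succ_eq_add_one, List.map_cons, List.sum_cons]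
    have hw := pvB_weight_pos (a+1, b+1, ready)
    omega
  · simp only [Bool.not_eq_true] at *
    subst ready
    simp only [Nat.succ_eq_add_one, List.map_cons, List.sum_cons, pvB_weight]
    have e1 : a + (b+1) + 1 = a + b + 1 + 1 := by omega
    have e2 : a + 1 + b + 1 = a + b + 1 + 1 := by omega
    have e3 : a + 1 + (b+1) + 1 = a + b + 1 + 1 + 1 := by omega
    rw [e1, e2, e3]
    have hx : 0 < (4:Nat) ^ (a+b+1) := Nat.pow_pos (by omega)
    omega

-- Source B's d(i, j): run the stack loop starting from one frame, then read memo[(i, j)]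
def pvB_d (p t : List Char) (i j : Nat) (memo : PySem.Dict (Nat × Nat) Int) :
    Int × PySem.Dict (Nat × Nat) Int :=
  let memo' := pvB_loop p t [(i, j, false)] memo
  (memo'.getD (i, j) 0, memo')

def string_compare_pd_dop_podc_alt (P : String) (T : String) : Option Int :=
  let p := P.toList
  let t := T.toList
  let n := p.length
  let m := t.length
  -- last = [d(n-1, j) for j in range(m)], the memo dict shared across the comprehension
  let res := (List.range m).foldl
      (fun (acc : List Int × PySem.Dict (Nat × Nat) Int) (j : Nat) =>
        let r := pvB_d p t (n - 1) j acc.2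
        (acc.1 ++ [r.1], r.2))
      (([], PySem.Dict.empty) : List Int × PySem.Dict (Nat × Nat) Int)
  let last := res.1
  match PySem.List.min? last (fun x => x) with
  | none => none
  | some best => (PySem.List.index? last best).map (fun k => (k : Int))

-- ===== PRECONDITION & SPEC =====
-- Pre_ excludes exactly the inputs where Python A raises IndexError: empty P (D[0] at the final loop) or empty T (D[i][0] = i).
def Pre_string_compare_pd_dop_podc (P : String) (T : String) : Prop :=
  P.toList ≠ [] ∧ T.toList ≠ []
instance (P : String) (T : String) : Decidable (Pre_string_compare_pd_dop_podc P T) := by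
  unfold Pre_string_compare_pd_dop_podc; infer_instance
def pvWitness_string_compare_pd_dop_podc : String × String := ("ab", "ba")

def Spec_string_compare_pd_dop_podc (P : String) (T : String) (out : Option Int) : Prop :=
  out = string_compare_pd_dop_podc_alt P T
instance (P : String) (T : String) (out : Option Int) :
    Decidable (Spec_string_compare_pd_dop_podc P T out) := by
  unfold Spec_string_compare_pd_dop_podc; infer_instance

-- ===== CLAIM (what is proved, stated in full; the proofs are below) =====
def Claim_equal_string_compare_pd_dop_podc : Prop :=
  ∀ (P : String) (T : String), Dom_string_compare_pd_dop_podc P T →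
    Pre_string_compare_pd_dop_podc P T →
    Spec_string_compare_pd_dop_podc P T (string_compare_pd_dop_podc P T)

-- ===== LEMMAS AND PROOFS =====

-- the pure value of the recurrence (proof-side specification of both programs' cells)
def pvE (p t : List Char) : Nat → Nat → Int
  | i, 0 => (i : Int)
  | 0, _+1 => 0
  | i+1, j+1 =>
      min (pvE p t i j +
          (if PySem.List.pyGetD p ((i:Int)+1) ' ' ≠ PySem.List.pyGetD t ((j:Int)+1) ' '
           then (1:Int) else 0))
        (min (pvE p t (i+1) j + 1) (pvE p t i (j+1) + 1))

-- memo invariant: every entry is the recurrence's value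
def pvInvB (p t : List Char) (memo : PySem.Dict (Nat × Nat) Int) : Prop :=
  ∀ a b v, memo.get? (a, b) = some v → v = pvE p t a b

-- extension: the loop never loses an entry's value
def pvExtB (m1 m2 : PySem.Dict (Nat × Nat) Int) : Prop :=
  ∀ k v, m1.get? k = some v → m2.get? k = some v

-- the stack machine is compositional: a prefix of the stack is consumed before the suffix
lemma pvB_loop_append (p t : List Char) :
    ∀ (st1 : List (Nat × Nat × Bool)) (memo : PySem.Dict (Nat × Nat) Int)
      (st2 : List (Nat × Nat × Bool)),
      pvB_loop p t (st1 ++ st2) memo = pvB_loop p t st2 (pvB_loop p t st1 memo) := by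
  intro st1 memo
  induction st1, memo using pvB_loop.induct p t with
  | case1 memo => intro st2; rw [List.nil_append, pvB_loop.eq_1]
  | case2 a snd st memo ih =>
      intro st2; rw [List.cons_append, pvB_loop.eq_2, pvB_loop.eq_2]; exact ih st2
  | case3 b snd st memo ih =>
      intro st2; rw [List.cons_append, pvB_loop.eq_3, pvB_loop.eq_3]; exact ih st2
  | case4 a b ready st memo h ih =>
      intro st2
      rw [List.cons_append, pvB_loop.eq_4, pvB_loop.eq_4, if_pos h, if_pos h]
      exact ih st2
  | case5 a b st memo h ih =>
      intro st2
      rw [List.cons_append, pvB_loop.eq_4, pvB_loop.eq_4, if_neg h, if_neg h,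
        if_pos rfl, if_pos rfl]
      simp only [dite_eq_ite] at ih
      exact ih st2
  | case6 a b ready st memo h hr ih =>
      intro st2
      rw [List.cons_append, pvB_loop.eq_4, pvB_loop.eq_4, if_neg h, if_neg h,
        if_neg hr, if_neg hr]
      exact ih st2

lemma pvExtB_refl (m : PySem.Dict (Nat × Nat) Int) : pvExtB m m := fun _ _ h => h

lemma pvExtB_trans {m1 m2 m3 : PySem.Dict (Nat × Nat) Int}
    (h12 : pvExtB m1 m2) (h23 : pvExtB m2 m3) : pvExtB m1 m3 :=
  fun k v h => h23 k v (h12 k v h)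

-- inserting the correct value preserves the invariant and extends the memo
lemma pvB_insert_ok (p t : List Char) (memo : PySem.Dict (Nat × Nat) Int)
    (a b : Nat) (hInv : pvInvB p t memo) :
    pvInvB p t (memo.insert (a, b) (pvE p t a b)) ∧
    pvExtB memo (memo.insert (a, b) (pvE p t a b)) ∧
    (memo.insert (a, b) (pvE p t a b)).get? (a, b) = some (pvE p t a b) := by
  refine ⟨?_, ?_, PySem.Dict.get?_insert_self _ _ _⟩
  · intro a' b' v hv
    by_cases hk : (a', b') = (a, b)
    · obtain ⟨rfl, rfl⟩ := Prod.mk.injEq a' b' a b ▸ Prod.ext_iff.mp hk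
      rw [PySem.Dict.get?_insert_self] at hv
      exact (Option.some.inj hv).symm
    · rw [PySem.Dict.get?_insert_of_ne _ _ hk] at hv
      exact hInv a' b' v hv
  · intro k v hv
    by_cases hk : k = (a, b)
    · subst hk
      have hva : v = pvE p t a b := hInv a b v hv
      rw [PySem.Dict.get?_insert_self, hva]
    · rw [PySem.Dict.get?_insert_of_ne _ _ hk]
      exact hv

-- the single-frame run computes pvE and preserves/extends the memo
lemma pvB_eval_ok (p t : List Char) :
    ∀ (s a b : Nat), a + b ≤ s → ∀ memo, pvInvB p t memo →
      pvInvB p t (pvB_loop p t [(a, b, false)] memo) ∧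
      pvExtB memo (pvB_loop p t [(a, b, false)] memo) ∧
      (pvB_loop p t [(a, b, false)] memo).get? (a, b) = some (pvE p t a b) := by
  intro s
  induction s with
  | zero =>
      intro a b hab memo hInv
      obtain rfl : a = 0 := by omega
      obtain rfl : b = 0 := by omega
      rw [pvB_loop.eq_2, pvB_loop.eq_1]
      simpa [pvE] using pvB_insert_ok p t memo 0 0 hInv
  | succ s ih =>
      intro a b hab memo hInv
      match a, b with
      | a, 0 =>
          rw [pvB_loop.eq_2, pvB_loop.eq_1]
          simpa [pvE] using pvB_insert_ok p t memo a 0 hInv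
      | 0, b+1 =>
          rw [pvB_loop.eq_3, pvB_loop.eq_1]
          simpa [pvE] using pvB_insert_ok p t memo 0 (b+1) hInv
      | a+1, b+1 =>
          rw [pvB_loop.eq_4]
          by_cases hc : memo.contains (a+1, b+1)
          · rw [if_pos hc, pvB_loop.eq_1]
            refine ⟨hInv, pvExtB_refl memo, ?_⟩
            have hsome : (memo.get? (a+1, b+1)).isSome := by
              rw [← PySem.Dict.contains_eq_isSome_get?]; exact hc
            obtain ⟨v, hv⟩ := Option.isSome_iff_exists.mp hsome
            rw [hv, hInv _ _ _ hv]
          · rw [if_neg hc, if_neg (by simp : ¬ (false = true))]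
            rw [show ((a, b+1, false) :: (a+1, b, false) :: (a, b, false)
                  :: (a+1, b+1, true) :: ([] : List (Nat × Nat × Bool)))
                = [(a, b+1, false)] ++ ([(a+1, b, false)] ++ ([(a, b, false)]
                    ++ [(a+1, b+1, true)])) from rfl,
              pvB_loop_append, pvB_loop_append, pvB_loop_append]
            obtain ⟨hInv1, hExt1, hGet1⟩ := ih a (b+1) (by omega) memo hInv
            set m1 := pvB_loop p t [(a, b+1, false)] memo with hm1
            obtain ⟨hInv2, hExt2, hGet2⟩ := ih (a+1) b (by omega) m1 hInv1
            set m2 := pvB_loop p t [(a+1, b, false)] m1 with hm2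
            obtain ⟨hInv3, hExt3, hGet3⟩ := ih a b (by omega) m2 hInv2
            set m3 := pvB_loop p t [(a, b, false)] m2 with hm3
            have hga : m3.get? (a, b) = some (pvE p t a b) := hGet3
            have hgb : m3.get? (a+1, b) = some (pvE p t (a+1) b) := hExt3 _ _ hGet2
            have hgc : m3.get? (a, b+1) = some (pvE p t a (b+1)) :=
              hExt3 _ _ (hExt2 _ _ hGet1)
            rw [pvB_loop.eq_4]
            by_cases hc3 : m3.contains (a+1, b+1)
            · rw [if_pos hc3, pvB_loop.eq_1]
              refine ⟨hInv3, pvExtB_trans hExt1 (pvExtB_trans hExt2 hExt3), ?_⟩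
              have hsome : (m3.get? (a+1, b+1)).isSome := by
                rw [← PySem.Dict.contains_eq_isSome_get?]; exact hc3
              obtain ⟨v, hv⟩ := Option.isSome_iff_exists.mp hsome
              rw [hv, hInv3 _ _ _ hv]
            · rw [if_neg hc3, if_pos rfl, pvB_loop.eq_1]
              have hval : min (m3.getD (a, b) 0 +
                    (if PySem.List.pyGetD p ((a:Int)+1) ' ' ≠ PySem.List.pyGetD t ((b:Int)+1) ' '
                     then (1:Int) else 0))
                  (min (m3.getD (a+1, b) 0 + 1) (m3.getD (a, b+1) 0 + 1))
                  = pvE p t (a+1) (b+1) := by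
                rw [PySem.Dict.getD_eq_get?_getD, PySem.Dict.getD_eq_get?_getD,
                  PySem.Dict.getD_eq_get?_getD, hga, hgb, hgc, pvE.eq_3]
                simp
              rw [hval]
              obtain ⟨hI, hE, hG⟩ := pvB_insert_ok p t m3 (a+1) (b+1) hInv3
              exact ⟨hI, pvExtB_trans hExt1 (pvExtB_trans hExt2 (pvExtB_trans hExt3 hE)), hG⟩

-- the comprehension: last = [pvE (n-1) j for j in range m] (memo threaded through)
lemma pvB_lastlist_aux (p t : List Char) (n : Nat) :
    ∀ (m : Nat),
      ((List.range m).foldl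
        (fun (acc : List Int × PySem.Dict (Nat × Nat) Int) (j : Nat) =>
          (acc.1 ++ [(pvB_d p t n j acc.2).1], (pvB_d p t n j acc.2).2))
        (([], PySem.Dict.empty) : List Int × PySem.Dict (Nat × Nat) Int)).1
      = (List.range m).map (fun j => pvE p t n j)
      ∧ pvInvB p t
        ((List.range m).foldl
          (fun (acc : List Int × PySem.Dict (Nat × Nat) Int) (j : Nat) =>
            (acc.1 ++ [(pvB_d p t n j acc.2).1], (pvB_d p t n j acc.2).2))
          (([], PySem.Dict.empty) : List Int × PySem.Dict (Nat × Nat) Int)).2 := by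
  intro m
  induction m with
  | zero =>
      refine ⟨rfl, ?_⟩
      intro a b v hv
      simp only [List.range_zero, List.foldl_nil] at hv
      rw [PySem.Dict.get?_empty] at hv
      cases hv
  | succ m ih =>
      obtain ⟨ih1, ih2⟩ := ih
      rw [List.range_succ, List.foldl_append, List.foldl_cons, List.foldl_nil,
        List.map_append, List.map_cons, List.map_nil]
      obtain ⟨hI, hE, hG⟩ := pvB_eval_ok p t (n + m) n m le_rfl _ ih2
      simp only [pvB_d] at hI hG ih1 ⊢
      constructor
      · rw [ih1]
        congr 1
        rw [PySem.Dict.getD_eq_get?_getD, hG]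
        rfl
      · exact hI

lemma pvB_lastlist (p t : List Char) (n : Nat) (m : Nat) :
    ((List.range m).foldl
      (fun (acc : List Int × PySem.Dict (Nat × Nat) Int) (j : Nat) =>
        (acc.1 ++ [(pvB_d p t n j acc.2).1], (pvB_d p t n j acc.2).2))
      (([], PySem.Dict.empty) : List Int × PySem.Dict (Nat × Nat) Int)).1
    = (List.range m).map (fun j => pvE p t n j) :=
  (pvB_lastlist_aux p t n m).1

-- ===== A-side machinery: rows of the conceptual table =====
def pvR_cell (p t : List Char) (prev : List Int) (i : Int)
    (cur : List Int) (j : Int) : List Int :=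
  let sub := PySem.List.pyGetD prev (j-1) 0 +
      (if PySem.List.pyGetD p i ' ' ≠ PySem.List.pyGetD t j ' ' then (1:Int) else 0)
  let ins := PySem.List.pyGetD cur (j-1) 0 + 1
  let del := PySem.List.pyGetD prev j 0 + 1
  cur ++ [min sub (min ins del)]

def pvR_row (p t : List Char) (prev : List Int) (i : Int) : List Int :=
  (PySem.List.pyRange 1 (t.length : Int) 1).foldl (pvR_cell p t prev i) [i]

def pvRows (p t : List Char) : Nat → List Int
  | 0 => List.replicate t.length 0
  | k+1 => pvR_row p t (pvRows p t k) ((k+1 : Nat) : Int)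

-- A's matrix with the first i rows computed and the rest still column-initialized.
def pvInitRow (m k : Nat) : List Int := (List.replicate m (0:Int)).set 0 (k : Int)
def pvDmat (p t : List Char) (n i : Nat) : List (List Int) :=
  (List.range n).map (fun k => if k < i then pvRows p t k else pvInitRow t.length k)

-- the D-only cell update (first projection of pvA_cell)
def pvMatCell (p t : List Char) (i : Int) (D : List (List Int)) (j : Int) : List (List Int) :=
  let zamian := PySem.List.pyGetD (PySem.List.pyGetD D (i-1) []) (j-1) 0 +
      (if PySem.List.pyGetD p i ' ' ≠ PySem.List.pyGetD t j ' ' then (1:Int) else 0)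
  let wstawien := PySem.List.pyGetD (PySem.List.pyGetD D i []) (j-1) 0 + 1
  let usuniec := PySem.List.pyGetD (PySem.List.pyGetD D (i-1) []) j 0 + 1
  PySem.List.pySetD D i (PySem.List.pySetD (PySem.List.pyGetD D i []) j
    ((PySem.List.min? [zamian, wstawien, usuniec] (fun x => x)).getD 0))

lemma pvA_cell_fst (p t : List Char) (i : Int)
    (st : List (List Int) × List (List Char)) (j : Int) :
    (pvA_cell p t i st j).1 = pvMatCell p t i st.1 j := rfl

lemma pv_foldl_fst {α β γ : Type} (f : α × β → γ → α × β) (g : α → γ → α)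
    (h : ∀ st x, (f st x).1 = g st.1 x) :
    ∀ (l : List γ) (st : α × β), (l.foldl f st).1 = l.foldl g st.1 := by
  intro l
  induction l with
  | nil => intro st; rfl
  | cons x xs ih =>
      intro st
      simp only [List.foldl_cons, ih, h]

lemma pvA_row_fst (p t : List Char)
    (st : List (List Int) × List (List Char)) (i : Int) :
    (pvA_row p t st i).1
      = (PySem.List.pyRange 1 (t.length : Int) 1).foldl (pvMatCell p t i) st.1 := by
  unfold pvA_row
  exact pv_foldl_fst _ _ (fun st j => pvA_cell_fst p t i st j) _ st

-- the 3-element Python min/list dance is just min of three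
lemma pv_min3 (a b c : Int) :
    (PySem.List.min? [a, b, c] (fun x => x)).getD 0 = min a (min b c) := by
  rw [PySem.List.min?_id_cons]
  simp [List.foldl, min_assoc]

-- length of the row-building fold
lemma pvR_fold_length (p t : List Char) (prev : List Int) (i : Int) :
    ∀ (l : List Int) (cur : List Int),
      (l.foldl (pvR_cell p t prev i) cur).length = cur.length + l.length := by
  intro l
  induction l with
  | nil => intro cur; simp
  | cons x xs ih =>
      intro cur
      simp only [List.foldl_cons, ih, pvR_cell]
      simp; omega

lemma pvRows_length (p t : List Char) (ht : t ≠ []) (k : Nat) :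
    (pvRows p t k).length = t.length := by
  cases k with
  | zero => simp [pvRows]
  | succ k =>
      have h1 : 1 ≤ t.length := List.length_pos_iff.mpr ht
      simp only [pvRows, pvR_row, pvR_fold_length, PySem.List.length_pyRange_one,
        List.length_singleton]
      omega

-- bridge: the inner row-building fold produces the recurrence's row
lemma pvR_inner_map (p t : List Char) (k : Nat)
    (prev : List Int)
    (hprev : prev = (List.range t.length).map (fun j => pvE p t k j)) :
    ∀ (jN : Nat), 1 ≤ jN → jN ≤ t.length →
      (PySem.List.pyRange 1 (jN : Int) 1).foldl
          (pvR_cell p t prev ((k+1 : Nat) : Int)) [((k+1 : Nat) : Int)]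
        = (List.range jN).map (fun j => pvE p t (k+1) j) := by
  intro jN
  induction jN with
  | zero => omega
  | succ jj ihj =>
      intro _ h2
      by_cases hjj : jj = 0
      · subst hjj
        rw [show ((0+1 : Nat) : Int) = 1 from by norm_num,
          PySem.List.pyRange_one_eq_nil le_rfl]
        rw [show (List.range 1) = [0] from rfl, List.map_cons, List.map_nil, pvE.eq_1]
        rfl
      · have hj1 : 1 ≤ jj := by omega
        have IH := ihj hj1 (by omega)
        rw [show ((jj+1 : Nat) : Int) = (jj : Int) + 1 from by push_cast; ring,
          PySem.List.pyRange_one_succ_right (by exact_mod_cast hj1 : (1:Int) ≤ (jj:Int)),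
          List.foldl_append, IH, List.foldl_cons, List.foldl_nil]
        obtain ⟨jm, rfl⟩ : ∃ jm, jj = jm + 1 := ⟨jj - 1, by omega⟩
        simp only [pvR_cell]
        rw [show ((jm+1 : Nat) : Int) - 1 = ((jm : Nat) : Int) from by push_cast; ring]
        simp only [PySem.List.pyGetD_natCast]
        rw [hprev,
          PySem.List.getD_map_range _ _ _ _ (by omega : jm < t.length),
          PySem.List.getD_map_range _ _ _ _ (by omega : jm + 1 < t.length),
          PySem.List.getD_map_range _ _ _ _ (by omega : jm < jm + 1)]
        conv_rhs => rw [List.range_succ, List.map_append, List.map_cons, List.map_nil]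
        congr 1
        rw [pvE.eq_3,
          show ((k : Int) + 1) = ((k+1 : Nat) : Int) from by push_cast; ring,
          show ((jm : Int) + 1) = ((jm+1 : Nat) : Int) from by push_cast; ring,
          PySem.List.pyGetD_natCast, PySem.List.pyGetD_natCast]

lemma pvRows_eq_map_pvE (p t : List Char) (ht : t ≠ []) (k : Nat) :
    pvRows p t k = (List.range t.length).map (fun j => pvE p t k j) := by
  have hm : 1 ≤ t.length := List.length_pos_iff.mpr ht
  induction k with
  | zero =>
      apply List.ext_getElem
      · simp [pvRows]
      · intro i h1 h2
        simp only [pvRows, List.getElem_replicate, List.getElem_map, List.getElem_range]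
        match i with
        | 0 => rw [pvE.eq_1]; rfl
        | i+1 => rw [pvE.eq_2]
  | succ k ih =>
      show pvR_row p t (pvRows p t k) ((k+1 : Nat) : Int)
        = (List.range t.length).map (fun j => pvE p t (k+1) j)
      unfold pvR_row
      exact pvR_inner_map p t k (pvRows p t k) ih t.length hm le_rfl

lemma pv_set_self {α : Type} (l : List α) (i : Nat) (v : α) (h : l[i]? = some v) :
    l.set i v = l := by
  apply List.ext_getElem?
  intro k
  by_cases hk : k = i
  · subst hk
    obtain ⟨hlt, -⟩ := List.getElem?_eq_some_iff.mp h
    rw [List.getElem?_set_self hlt, h]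
  · rw [List.getElem?_set_ne (fun he => hk he.symm)]

lemma pv_set_map_range {α : Type} (n i : Nat) (f : Nat → α) (v : α) (_hi : i < n) :
    ((List.range n).map f).set i v
      = (List.range n).map (fun k => if k = i then v else f k) := by
  apply List.ext_getElem
  · simp
  · intro k h1 h2
    simp only [List.getElem_set, List.getElem_map, List.getElem_range]
    by_cases hk : k = i
    · simp [hk]
    · simp [hk, Ne.symm hk]

lemma pvInitRow_cons (m k : Nat) (hm : 1 ≤ m) :
    pvInitRow m k = (k : Int) :: List.replicate (m - 1) 0 := by
  unfold pvInitRow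
  cases m with
  | zero => omega
  | succ mm => simp [List.replicate_succ]

lemma pvInitRow_zero (m : Nat) (hm : 1 ≤ m) :
    pvInitRow m 0 = List.replicate m (0 : Int) := by
  rw [pvInitRow_cons m 0 hm]
  cases m with
  | zero => omega
  | succ mm => simp [List.replicate_succ]

lemma pvDmat_length (p t : List Char) (n i : Nat) : (pvDmat p t n i).length = n := by
  simp [pvDmat]

lemma pvDmat_get (p t : List Char) (n i k : Nat) (hk : k < n) :
    (pvDmat p t n i)[k]?
      = some (if k < i then pvRows p t k else pvInitRow t.length k) := by
  simp [pvDmat, List.getElem?_map, List.getElem?_range hk]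

-- ===== inner coupling: A's in-place row update equals the appended row =====
lemma pv_inner (p t : List Char) (iN : Nat) (_hi : 1 ≤ iN)
    (prev : List Int) (_hprev : prev.length = t.length)
    (D0 : List (List Int)) (hlen : iN < D0.length)
    (hrp : D0[iN-1]? = some prev)
    (hrc : D0[iN]? = some ((iN : Int) :: List.replicate (t.length - 1) 0)) :
    ∀ (j : Nat), 1 ≤ j → j ≤ t.length →
      (PySem.List.pyRange 1 (j : Int) 1).foldl (pvMatCell p t (iN : Int)) D0
        = D0.set iN
            (((PySem.List.pyRange 1 (j : Int) 1).foldl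
                (pvR_cell p t prev (iN : Int)) [(iN : Int)])
              ++ List.replicate (t.length - j) 0)
      ∧ ((PySem.List.pyRange 1 (j : Int) 1).foldl
            (pvR_cell p t prev (iN : Int)) [(iN : Int)]).length = j := by
  intro j
  induction j with
  | zero => omega
  | succ jj ihj =>
      intro _ h2
      by_cases hjj : jj = 0
      · subst hjj
        rw [show ((0+1 : Nat) : Int) = 1 from by norm_num,
          PySem.List.pyRange_one_eq_nil le_rfl]
        exact ⟨(pv_set_self _ _ _ hrc).symm, rfl⟩
      · have hj1 : 1 ≤ jj := by omega
        obtain ⟨IH1, IH2⟩ := ihj (by omega) (by omega)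
        have hcast : ((jj+1 : Nat) : Int) = (jj : Int) + 1 := by push_cast; ring
        have h1j : (1:Int) ≤ (jj:Int) := by exact_mod_cast hj1
        rw [hcast, PySem.List.pyRange_one_succ_right h1j, List.foldl_append,
          List.foldl_append, IH1, List.foldl_cons, List.foldl_nil, List.foldl_cons,
          List.foldl_nil]
        set cB := (PySem.List.pyRange 1 ((jj : Nat) : Int) 1).foldl
            (pvR_cell p t prev ((iN : Nat) : Int)) [((iN : Nat) : Int)] with hcBdef
        constructor
        · have hg_self :
              (D0.set iN (cB ++ List.replicate (t.length - jj) (0:Int))).getD iN []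
                = cB ++ List.replicate (t.length - jj) 0 := by
            rw [List.getD_eq_getElem?_getD, List.getElem?_set_self (by omega)]
            rfl
          have hg_prev :
              (D0.set iN (cB ++ List.replicate (t.length - jj) (0:Int))).getD (iN - 1) []
                = prev := by
            rw [List.getD_eq_getElem?_getD, List.getElem?_set_ne (by omega : iN ≠ iN - 1),
              hrp]
            rfl
          simp only [pvMatCell, pvR_cell]
          rw [show (iN : Int) - 1 = ((iN - 1 : Nat) : Int) from by omega]
          rw [show (jj : Int) - 1 = ((jj - 1 : Nat) : Int) from by omega]
          simp only [PySem.List.pyGetD_natCast, PySem.List.pySetD_natCast]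
          rw [hg_self, hg_prev, pv_min3]
          rw [List.getD_append _ _ _ _ (by omega : jj - 1 < cB.length)]
          rw [List.set_append_right _ _ (by omega : cB.length ≤ jj)]
          rw [IH2, Nat.sub_self]
          rw [show t.length - jj = (t.length - (jj+1)) + 1 from by omega,
            List.replicate_succ, List.set_cons_zero, List.append_cons, List.set_set]
          rw [List.append_cons]
        · simp only [pvR_cell]
          simp [IH2]

-- ===== outer loop =====
lemma pv_outer (p t : List Char) (hp : p ≠ []) (ht : t ≠ []) :
    ∀ (i : Nat), 1 ≤ i → i ≤ p.length →
      (PySem.List.pyRange 1 (i : Int) 1).foldl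
          (fun D ii => (PySem.List.pyRange 1 (t.length : Int) 1).foldl (pvMatCell p t ii) D)
          (pvDmat p t p.length 1)
        = pvDmat p t p.length i := by
  have hm : 1 ≤ t.length := List.length_pos_iff.mpr ht
  have hn : 1 ≤ p.length := List.length_pos_iff.mpr hp
  intro i hi hin
  induction i with
  | zero => omega
  | succ k ih =>
      by_cases hk : k = 0
      · subst hk
        rw [show ((0+1 : Nat) : Int) = 1 from by norm_num,
          PySem.List.pyRange_one_eq_nil le_rfl]
        rfl
      · have hk1 : 1 ≤ k := by omega
        have hkn : k < p.length := by omega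
        rw [show ((k+1 : Nat) : Int) = (k : Int) + 1 from by push_cast; ring,
          PySem.List.pyRange_one_succ_right (by exact_mod_cast hk1),
          List.foldl_append, ih hk1 (by omega), List.foldl_cons, List.foldl_nil]
        have happ := pv_inner p t k hk1 (pvRows p t (k-1))
          (pvRows_length p t ht (k-1)) (pvDmat p t p.length k)
          (by rw [pvDmat_length]; omega)
          (by rw [pvDmat_get p t p.length k (k-1) (by omega), if_pos (by omega)])
          (by rw [pvDmat_get p t p.length k k hkn, if_neg (lt_irrefl k),
                pvInitRow_cons _ _ hm])
          t.length hm le_rfl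
        rw [happ.1, Nat.sub_self, List.replicate_zero, List.append_nil]
        have hrow : pvR_row p t (pvRows p t (k-1)) ((k : Nat) : Int) = pvRows p t k := by
          cases k with
          | zero => omega
          | succ kk => simp [pvRows]
        rw [show (PySem.List.pyRange 1 ((t.length : Nat) : Int) 1).foldl
            (pvR_cell p t (pvRows p t (k-1)) ((k : Nat) : Int)) [((k : Nat) : Int)]
              = pvR_row p t (pvRows p t (k-1)) ((k : Nat) : Int) from rfl, hrow]
        unfold pvDmat
        rw [pv_set_map_range _ k _ _ hkn]
        apply List.map_congr_left
        intro a ha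
        have han : a < p.length := List.mem_range.mp ha
        by_cases hak : a = k
        · subst hak
          rw [if_pos rfl, if_pos (by omega : a < a + 1)]
        · by_cases halt : a < k
          · rw [if_neg hak, if_pos halt, if_pos (by omega : a < k + 1)]
          · rw [if_neg hak, if_neg halt, if_neg (by omega : ¬ a < k + 1)]

-- column initialization produces pvDmat … 1
lemma pv_colinit (p t : List Char) (ht : t ≠ []) :
    (List.range p.length).foldl
        (fun D (i : Nat) => PySem.List.pySetD D (i : Int)
          (PySem.List.pySetD (PySem.List.pyGetD D (i : Int) []) 0 (i : Int)))
        (List.replicate p.length (List.replicate t.length (0:Int)))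
      = pvDmat p t p.length 1 := by
  have hm : 1 ≤ t.length := List.length_pos_iff.mpr ht
  have aux : ∀ kk, kk ≤ p.length →
      (List.range kk).foldl
          (fun D (i : Nat) => PySem.List.pySetD D (i : Int)
            (PySem.List.pySetD (PySem.List.pyGetD D (i : Int) []) 0 (i : Int)))
          (List.replicate p.length (List.replicate t.length (0:Int)))
        = (List.range p.length).map
            (fun idx => if idx < kk then pvInitRow t.length idx
              else List.replicate t.length 0) := by
    intro kk
    induction kk with
    | zero =>
        intro _
        simp [List.map_const']
    | succ kk ih =>
        intro hkk
        rw [List.range_succ, List.foldl_append, ih (by omega), List.foldl_cons,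
          List.foldl_nil]
        rw [PySem.List.pyGetD_natCast, PySem.List.pySetD_natCast]
        rw [List.getD_eq_getElem?_getD, List.getElem?_map, List.getElem?_range (by omega)]
        simp only [Option.map_some, Option.getD_some, if_neg (lt_irrefl kk)]
        rw [show ∀ (l : List Int) (v : Int), PySem.List.pySetD l (0:Int) v = l.set 0 v from
          fun l v => by
            rw [(by norm_num : (0:Int) = ((0:Nat) : Int)), PySem.List.pySetD_natCast]]
        rw [pv_set_map_range _ kk _ _ (by omega)]
        apply List.map_congr_left
        intro a ha
        have han : a < p.length := List.mem_range.mp ha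
        by_cases hak : a = kk
        · subst hak
          simp [pvInitRow]
        · by_cases halt : a < kk
          · rw [if_neg hak, if_pos halt, if_pos (by omega : a < kk + 1)]
          · rw [if_neg hak, if_neg halt, if_neg (by omega : ¬ a < kk + 1)]
  rw [aux p.length le_rfl]
  unfold pvDmat
  apply List.map_congr_left
  intro a ha
  have han : a < p.length := List.mem_range.mp ha
  by_cases ha0 : a = 0
  · subst ha0
    simp only [if_pos han, if_pos (by omega : (0:Nat) < 1)]
    rw [pvInitRow_zero _ hm]
    rfl
  · rw [if_pos han, if_neg (by omega : ¬ a < 1)]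

lemma pv_idxOf?_of_mem {l : List Int} {a : Int} (h : a ∈ l) :
    List.idxOf? a l = some (List.idxOf a l) := by
  induction l with
  | nil => simp at h
  | cons b rest ih =>
      by_cases hba : b = a
      · subst hba; simp [List.idxOf?_cons]
      · rcases List.mem_cons.mp h with h1 | h2
        · exact absurd h1.symm hba
        · simp [List.idxOf?_cons, hba, ih h2]

-- ===== final argmin scan =====
def pvScanGo : List Int → Nat → Option Int × Option Int → Option Int × Option Int
  | [], _, acc => acc
  | v :: rest, k, acc =>
      pvScanGo rest (k+1)
        (match acc.1 with
          | none => (some v, some (k : Int))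
          | some mm => if v < mm then (some v, some (k : Int)) else acc)

lemma pvScan_range (l : List Int) :
    ∀ (k : Nat) (acc : Option Int × Option Int),
      (List.range l.length).foldl
          (fun acc (i : Nat) =>
            match acc.1 with
            | none => (some (l.getD i 0), some ((i + k : Nat) : Int))
            | some mm =>
              if l.getD i 0 < mm then (some (l.getD i 0), some ((i + k : Nat) : Int)) else acc)
          acc
        = pvScanGo l k acc := by
  induction l with
  | nil => intro k acc; simp [pvScanGo]
  | cons v rest ih =>
      intro k acc
      rw [List.length_cons, List.range_succ_eq_map, List.foldl_cons, List.foldl_map]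
      simp only [List.getD_cons_zero, List.getD_cons_succ, Nat.zero_add]
      simp only [show ∀ i : Nat, i + 1 + k = i + (k + 1) from fun i => by omega]
      rw [ih (k + 1)]
      rfl

lemma pvScanGo_some (l : List Int) :
    ∀ (k : Nat) (m : Int) (idx : Option Int),
      pvScanGo l k (some m, idx)
        = (some (l.foldl min m),
            if l.foldl min m < m then
              some ((k + l.idxOf (l.foldl min m) : Nat) : Int)
            else idx) := by
  induction l with
  | nil => intro k m idx; simp [pvScanGo]
  | cons v rest ih =>
      intro k m idx
      show pvScanGo rest (k+1) (if v < m then _ else _) = _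
      rw [List.foldl_cons]
      by_cases hv : v < m
      · rw [if_pos hv, min_eq_right hv.le, ih (k+1) v (some (k : Int))]
        have hMle : List.foldl min v rest ≤ v := (PySem.List.foldl_min_le rest v).1
        rw [if_pos (lt_of_le_of_lt hMle hv)]
        by_cases hMv : List.foldl min v rest < v
        · have hne : v ≠ List.foldl min v rest := by omega
          rw [if_pos hMv, List.idxOf_cons_ne rest hne,
            show k + 1 + List.idxOf (List.foldl min v rest) rest
              = k + (List.idxOf (List.foldl min v rest) rest).succ from by omega]
        · have hM : List.foldl min v rest = v := le_antisymm hMle (not_lt.mp hMv)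
          rw [if_neg hMv, hM, List.idxOf_cons_self]
          simp
      · rw [if_neg hv, min_eq_left (not_lt.mp hv), ih (k+1) m idx]
        by_cases hMm : List.foldl min m rest < m
        · have hne : v ≠ List.foldl min m rest := by
            have := not_lt.mp hv
            omega
          rw [if_pos hMm, if_pos hMm, List.idxOf_cons_ne rest hne,
            show k + 1 + List.idxOf (List.foldl min m rest) rest
              = k + (List.idxOf (List.foldl min m rest) rest).succ from by omega]
        · rw [if_neg hMm, if_neg hMm]

-- the scan is the first argmin
lemma pv_scan_argmin (l : List Int) (hl : l ≠ []) :
    (pvScanGo l 0 (none, none)).2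
      = match PySem.List.min? l (fun x => x) with
        | none => none
        | some best => (PySem.List.index? l best).map (fun k => (k : Int)) := by
  cases l with
  | nil => exact absurd rfl hl
  | cons v rest =>
      have hstep : pvScanGo (v :: rest) 0 (none, none)
          = pvScanGo rest 1 (some v, some (0 : Int)) := rfl
      rw [hstep, pvScanGo_some rest 1 v (some (0 : Int)), PySem.List.min?_id_cons]
      show _ = (PySem.List.index? (v :: rest) (List.foldl min v rest)).map (fun k => (k : Int))
      have hMle : List.foldl min v rest ≤ v := (PySem.List.foldl_min_le rest v).1
      by_cases hMv : List.foldl min v rest < v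
      · have hmem : List.foldl min v rest ∈ rest := by
          rcases PySem.List.foldl_min_mem rest v with h | h
          · omega
          · exact h
        have hne : v ≠ List.foldl min v rest := by omega
        rw [PySem.List.index?_cons_of_ne rest hne, PySem.List.index?_eq_idxOf?,
          pv_idxOf?_of_mem hmem]
        simp only [if_pos hMv, Option.map_some]
        simp [Nat.add_comm]
      · have hM : List.foldl min v rest = v := le_antisymm hMle (not_lt.mp hMv)
        rw [hM, PySem.List.index?_cons_self]
        simp

-- ===== VERDICT (by name: the statement is the Claim_ definition above) =====
theorem string_compare_pd_dop_podc_spec : Claim_equal_string_compare_pd_dop_podc := by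
  unfold Claim_equal_string_compare_pd_dop_podc
  intro P T _ hpre
  obtain ⟨hp, ht⟩ := hpre
  unfold Spec_string_compare_pd_dop_podc
  have hn : 1 ≤ P.toList.length := List.length_pos_iff.mpr hp
  have hm : 1 ≤ T.toList.length := List.length_pos_iff.mpr ht
  simp only [string_compare_pd_dop_podc, string_compare_pd_dop_podc_alt,
    List.length_replicate]
  rw [pvB_lastlist P.toList T.toList (P.toList.length - 1) T.toList.length]
  rw [← pvRows_eq_map_pvE P.toList T.toList ht (P.toList.length - 1)]
  rw [pv_foldl_fst (pvA_row P.toList T.toList)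
      (fun D ii => (PySem.List.pyRange 1 (T.toList.length : Int) 1).foldl
        (pvMatCell P.toList T.toList ii) D)
      (pvA_row_fst P.toList T.toList)]
  rw [show ∀ (x : List (List Int)) (y : List (List Char)), (x, y).1 = x from
    fun x y => rfl]
  rw [pv_colinit P.toList T.toList ht]
  rw [pv_outer P.toList T.toList hp ht P.toList.length hn le_rfl]
  have hne : pvDmat P.toList T.toList P.toList.length P.toList.length ≠ [] := by
    apply List.length_pos_iff.mp
    rw [pvDmat_length]
    omega
  have hrow0 : PySem.List.pyGetD (pvDmat P.toList T.toList P.toList.length P.toList.length)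
      0 [] = pvRows P.toList T.toList 0 := by
    rw [PySem.List.pyGetD_zero, List.getD_eq_getElem?_getD,
      pvDmat_get P.toList T.toList P.toList.length P.toList.length 0 (by omega),
      if_pos (by omega)]
    rfl
  have hlast : PySem.List.pyGetD (pvDmat P.toList T.toList P.toList.length P.toList.length)
      (-1) [] = pvRows P.toList T.toList (P.toList.length - 1) := by
    rw [PySem.List.pyGetD_neg_one _ _ hne, List.getLast_eq_getElem,
      List.getElem_eq_iff _, pvDmat_length,
      pvDmat_get P.toList T.toList P.toList.length P.toList.length
        (P.toList.length - 1) (by omega),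
      if_pos (by omega)]
  rw [hrow0, hlast]
  rw [show (pvRows P.toList T.toList 0).length = T.toList.length from by simp [pvRows]]
  simp only [PySem.List.pyGetD_natCast]
  rw [show T.toList.length = (pvRows P.toList T.toList (P.toList.length - 1)).length from
    (pvRows_length P.toList T.toList ht _).symm]
  have hscan := pvScan_range (pvRows P.toList T.toList (P.toList.length - 1)) 0
    ((none, none) : Option Int × Option Int)
  simp only [Nat.add_zero] at hscan
  rw [hscan, pv_scan_argmin _ (by
    apply List.length_pos_iff.mp
    rw [pvRows_length P.toList T.toList ht]
    omega)]
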